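-- pv_equiv track=rewrite | github.com/parveenchahal/DS-Algo | find_permutation.py | find_permutation2
-- ===== SOURCE A (Python) =====
-- def find_permutation2(s, n):
--     result = []
--     count = 1
--     d_count = 0
--     i = 0
--     if s[0] == 'I':
--         result.append(count)
--         count += 1
--     else:
--         while(i < n - 1 and s[i] != 'I'):
--             d_count += 1
--             i += 1
--         count += d_count + 1
--         t = count - 1
--         result.append(t)
--         t -= 1
--         while(d_count > 0):
--             result.append(t)
--             t -= 1
--             d_count -= 1
--
--     while(i < n - 1):
--         if s[i] == 'I' and(i >= n - 2 or s[i + 1] == 'I'):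
--             result.append(count)
--             count += 1
--             i += 1
--         else:
--             i += 1
--             while(i < n - 1 and s[i] != 'I'):
--                 d_count += 1
--                 i += 1
--             t = count + d_count
--             result.append(t)
--             count += 1
--             t -= 1
--             while(d_count > 0):
--                 result.append(t)
--                 count += 1
--                 t -= 1
--                 d_count -= 1
--     return result
-- ===== SOURCE B (Python) =====
-- def find_permutation2(s, n):
--     # Stack-based: push i; flush the pending (decreasing) run whenever the
--     # string says "increase" here or we are at the last value; do-while, so
--     # the first value is always processed.
--     result = []
--     stack = []
--     i = 1
--     while True:
--         stack.append(i)
--         if i >= n or s[i - 1] == 'I':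
--             while stack:
--                 result.append(stack.pop())
--         if i >= n:
--             break
--         i += 1
--     return result
-- ===== Notes on version B (the rewrite author's own statement) =====
-- stated objective: simpler
-- what changed: Replaces A's run-length bookkeeping (count/d_count/t with a special-cased first block and nested scan/emit loops) by a single pass with an explicit stack: push i, and flush the stack in LIFO order at each 'I' or at the last value.
import Mathlib
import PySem

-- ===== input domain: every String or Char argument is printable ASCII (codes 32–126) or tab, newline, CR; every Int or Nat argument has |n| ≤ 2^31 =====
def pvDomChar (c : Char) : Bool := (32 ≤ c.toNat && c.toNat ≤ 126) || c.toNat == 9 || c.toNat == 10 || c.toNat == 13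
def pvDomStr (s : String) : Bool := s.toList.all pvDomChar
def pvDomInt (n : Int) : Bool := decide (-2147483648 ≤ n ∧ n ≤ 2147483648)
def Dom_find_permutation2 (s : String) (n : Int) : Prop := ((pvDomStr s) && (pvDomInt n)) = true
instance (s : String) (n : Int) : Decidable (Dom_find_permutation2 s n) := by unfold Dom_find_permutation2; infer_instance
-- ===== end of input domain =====

-- B replaces A's count/d_count/t run-length bookkeeping by one pass with an explicit
-- stack flushed at each 'I' (objective: simpler). Equivalence is about return values;
-- neither program mutates its arguments.

-- ===== PORT A =====
-- s[i] ported via pyGet?; the ' ' default is never reached on inputs admitted by Pre_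
-- (there every index Python reads is in range; out of range Python raises IndexError).
def pvCharAt (cs : List Char) (i : Int) : Char := (PySem.List.pyGet? cs i).getD ' '

-- while(i < n - 1 and s[i] != 'I'): d_count += 1; i += 1   -- returns (i, d_count);
-- the Nat argument is fuel (the callers pass the loop's exact iteration bound n-1-i)
def pvScanD (cs : List Char) (n : Int) : Nat → Int → Int → Int × Int
  | 0, i, d => (i, d)
  | fuel + 1, i, d =>
    if i < n - 1 ∧ pvCharAt cs i ≠ 'I' then pvScanD cs n fuel (i + 1) (d + 1) else (i, d)

-- while(d_count > 0): result.append(t); t -= 1; d_count -= 1   -- fuel = d_count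
def pvEmit1 : Nat → List Int → Int → Int → List Int × Int × Int
  | 0, res, t, d => (res, t, d)
  | fuel + 1, res, t, d =>
    if d > 0 then pvEmit1 fuel (res ++ [t]) (t - 1) (d - 1) else (res, t, d)

-- while(d_count > 0): result.append(t); count += 1; t -= 1; d_count -= 1   -- fuel = d_count
def pvEmit2 : Nat → List Int → Int → Int → Int → List Int × Int × Int × Int
  | 0, res, c, t, d => (res, c, t, d)
  | fuel + 1, res, c, t, d =>
    if d > 0 then pvEmit2 fuel (res ++ [t]) (c + 1) (t - 1) (d - 1) else (res, c, t, d)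

-- the outer while(i < n - 1) loop of A; fuel bounds the remaining iterations (i grows
-- by at least 1 per pass), so the fuel-0 cut is never reached while i < n - 1
def pvMainLoop (cs : List Char) (n : Int) : Nat → List Int → Int → Int → Int → List Int
  | 0, res, _, _, _ => res
  | fuel + 1, res, count, i, d =>
    if i < n - 1 then
      if pvCharAt cs i = 'I' ∧ (i ≥ n - 2 ∨ pvCharAt cs (i + 1) = 'I') then
        pvMainLoop cs n fuel (res ++ [count]) (count + 1) (i + 1) d
      else
        let p := pvScanD cs n (n - 1 - (i + 1)).toNat (i + 1) d
        let t := count + p.2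
        let q := pvEmit2 p.2.toNat (res ++ [t]) (count + 1) (t - 1) p.2
        pvMainLoop cs n fuel q.1 q.2.1 p.1 q.2.2.2
    else res

def find_permutation2 (s : String) (n : Int) : List Int :=
  let cs := s.toList
  if pvCharAt cs 0 = 'I' then
    pvMainLoop cs n (n - 1).toNat [1] 2 0 0
  else
    let p := pvScanD cs n (n - 1).toNat 0 0
    let count := 1 + (p.2 + 1)
    let t := count - 1
    let q := pvEmit1 p.2.toNat [t] (t - 1) p.2
    pvMainLoop cs n (n - 1 - p.1).toNat q.1 count p.1 q.2.2

-- ===== PORT B =====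
-- do-while: stack.append(i); if i >= n or s[i-1] == 'I': pop all onto result;
-- break when i >= n — the fuel is the number of iterations, (n-1).toNat + 1
def pvLoopB (cs : List Char) (n : Int) : Nat → Int → List Int → List Int → List Int
  | 0, _, _, res => res
  | fuel + 1, i, stack, res =>
    let st := stack ++ [i]
    if n ≤ i ∨ pvCharAt cs (i - 1) = 'I' then
      if n ≤ i then res ++ st.reverse
      else pvLoopB cs n fuel (i + 1) [] (res ++ st.reverse)
    else
      if n ≤ i then res
      else pvLoopB cs n fuel (i + 1) st res

def find_permutation2_alt (s : String) (n : Int) : List Int :=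
  pvLoopB s.toList n ((n - 1).toNat + 1) 1 [] []

-- ===== PRECONDITION & SPEC =====
-- Python A raises IndexError iff s is empty (the unconditional s[0]) or len(s) < n - 1
-- (every index 0..n-2 is read); Pre_ excludes exactly those inputs.
def Pre_find_permutation2 (s : String) (n : Int) : Prop :=
  s ≠ "" ∧ n - 1 ≤ (s.length : Int)
instance (s : String) (n : Int) : Decidable (Pre_find_permutation2 s n) := by
  unfold Pre_find_permutation2; infer_instance

def pvWitness_find_permutation2 : String × Int := ("ID", 3)

def Spec_find_permutation2 (s : String) (n : Int) (out : List Int) : Prop :=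
  out = find_permutation2_alt s n
instance (s : String) (n : Int) (out : List Int) : Decidable (Spec_find_permutation2 s n out) := by
  unfold Spec_find_permutation2; infer_instance

-- ===== CLAIM (what is proved, stated in full; the proofs are below) =====
def Claim_equal_find_permutation2 : Prop := ∀ (s : String) (n : Int), Dom_find_permutation2 s n → Pre_find_permutation2 s n → Spec_find_permutation2 s n (find_permutation2 s n)

-- ===== LEMMAS AND PROOFS =====

-- [b, b-1, ..., a] (empty if b < a): proof-side description of one emitted block
def pvDownTo (b a : Int) : List Int :=
  if h : b < a then [] else b :: pvDownTo (b - 1) a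
termination_by (b + 1 - a).toNat
decreasing_by omega

theorem pvDownTo_nil (b a : Int) (h : b < a) : pvDownTo b a = [] := by
  rw [pvDownTo, dif_pos h]

theorem pvDownTo_cons (b a : Int) (h : a ≤ b) : pvDownTo b a = b :: pvDownTo (b - 1) a := by
  rw [pvDownTo, dif_neg (by omega)]

theorem pvScanD_ge (cs : List Char) (n : Int) :
    ∀ (f : ℕ) (i d : Int), i ≤ (pvScanD cs n f i d).1 := by
  intro f
  induction f with
  | zero => intro i d; simp [pvScanD]
  | succ f ih =>
    intro i d
    by_cases hc : i < n - 1 ∧ pvCharAt cs i ≠ 'I'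
    · simp only [pvScanD, if_pos hc]
      have := ih (i + 1) (d + 1)
      omega
    · simp only [pvScanD, if_neg hc]
      omega

theorem pvScanD_add (cs : List Char) (n : Int) :
    ∀ (f : ℕ) (i d e : Int),
      pvScanD cs n f i (d + e) = ((pvScanD cs n f i d).1, e + (pvScanD cs n f i d).2) := by
  intro f
  induction f with
  | zero => intro i d e; simp [pvScanD]; omega
  | succ f ih =>
    intro i d e
    by_cases hc : i < n - 1 ∧ pvCharAt cs i ≠ 'I'
    · simp only [pvScanD, if_pos hc]
      rw [show d + e + 1 = d + 1 + e by ring, ih (i + 1) (d + 1) e]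
    · simp only [pvScanD, if_neg hc]
      simp; omega

theorem pvScanD_len (cs : List Char) (n : Int) :
    ∀ (f : ℕ) (i d : Int), (pvScanD cs n f i d).1 = i + ((pvScanD cs n f i d).2 - d) := by
  intro f
  induction f with
  | zero => intro i d; simp [pvScanD]
  | succ f ih =>
    intro i d
    by_cases hc : i < n - 1 ∧ pvCharAt cs i ≠ 'I'
    · simp only [pvScanD, if_pos hc]
      have := ih (i + 1) (d + 1)
      omega
    · simp only [pvScanD, if_neg hc]
      simp

theorem pvScanD_stop (cs : List Char) (n : Int) :
    ∀ (f : ℕ) (i d : Int), n - 1 - i ≤ (f : Int) →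
      n - 1 ≤ (pvScanD cs n f i d).1 ∨ pvCharAt cs (pvScanD cs n f i d).1 = 'I' := by
  intro f
  induction f with
  | zero =>
    intro i d hf
    simp only [pvScanD]
    exact Or.inl (by push_cast at hf; omega)
  | succ f ih =>
    intro i d hf
    by_cases hc : i < n - 1 ∧ pvCharAt cs i ≠ 'I'
    · simp only [pvScanD, if_pos hc]
      exact ih (i + 1) (d + 1) (by push_cast at hf ⊢; omega)
    · simp only [pvScanD, if_neg hc]
      rcases not_and_or.mp hc with h1 | h1
      · exact Or.inl (by simp; omega)
      · exact Or.inr (by simpa using not_not.mp h1)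

-- the scan stops at once when its start already satisfies the stop condition
theorem pvScanNow (cs : List Char) (n k : Int) (h : n - 1 ≤ k ∨ pvCharAt cs k = 'I') :
    pvScanD cs n (n - 1 - k).toNat k 0 = (k, 0) := by
  cases hF : (n - 1 - k).toNat with
  | zero => simp [pvScanD]
  | succ f =>
    simp only [pvScanD]
    rw [if_neg]
    rintro ⟨h1, h2⟩
    rcases h with h | h
    · omega
    · exact h2 h

-- one step of the scan, fuel kept in the canonical (n-1-start).toNat form
theorem pvScanStep (cs : List Char) (n k : Int) (hk : k < n - 1) (hI : pvCharAt cs k ≠ 'I') :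
    pvScanD cs n (n - 1 - k).toNat k 0
      = ((pvScanD cs n (n - 1 - (k + 1)).toNat (k + 1) 0).1,
         1 + (pvScanD cs n (n - 1 - (k + 1)).toNat (k + 1) 0).2) := by
  have hF : (n - 1 - k).toNat = (n - 1 - (k + 1)).toNat + 1 := by omega
  rw [hF]
  simp only [pvScanD]
  rw [if_pos ⟨hk, hI⟩]
  have := pvScanD_add cs n (n - 1 - (k + 1)).toNat (k + 1) 0 1
  rw [show (0 : Int) + 1 = 0 + 1 from rfl]
  exact this

theorem pvEmit1_eq :
    ∀ (f : ℕ) (res : List Int) (t d : Int), 0 ≤ d → d ≤ (f : Int) →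
      pvEmit1 f res t d = (res ++ pvDownTo t (t - d + 1), t - d, 0) := by
  intro f
  induction f with
  | zero =>
    intro res t d h0 hf
    have hd : d = 0 := by push_cast at hf; omega
    subst hd
    simp only [pvEmit1]
    rw [pvDownTo_nil t (t - 0 + 1) (by omega)]
    simp
  | succ f ih =>
    intro res t d h0 hf
    by_cases hd : d > 0
    · simp only [pvEmit1, if_pos hd]
      rw [ih (res ++ [t]) (t - 1) (d - 1) (by omega) (by push_cast at hf ⊢; omega)]
      rw [show t - 1 - (d - 1) + 1 = t - d + 1 by ring, show t - 1 - (d - 1) = t - d by ring,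
        pvDownTo_cons t (t - d + 1) (by omega)]
      simp
    · have hd0 : d = 0 := by omega
      subst hd0
      simp only [pvEmit1, if_neg hd]
      rw [pvDownTo_nil t (t - 0 + 1) (by omega)]
      simp

theorem pvEmit2_eq :
    ∀ (f : ℕ) (res : List Int) (c t d : Int), 0 ≤ d → d ≤ (f : Int) →
      pvEmit2 f res c t d = (res ++ pvDownTo t (t - d + 1), c + d, t - d, 0) := by
  intro f
  induction f with
  | zero =>
    intro res c t d h0 hf
    have hd : d = 0 := by push_cast at hf; omega
    subst hd
    simp only [pvEmit2]
    rw [pvDownTo_nil t (t - 0 + 1) (by omega)]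
    simp
  | succ f ih =>
    intro res c t d h0 hf
    by_cases hd : d > 0
    · simp only [pvEmit2, if_pos hd]
      rw [ih (res ++ [t]) (c + 1) (t - 1) (d - 1) (by omega) (by push_cast at hf ⊢; omega)]
      rw [show t - 1 - (d - 1) + 1 = t - d + 1 by ring, show t - 1 - (d - 1) = t - d by ring,
        show c + 1 + (d - 1) = c + d by ring, pvDownTo_cons t (t - d + 1) (by omega)]
      simp
    · have hd0 : d = 0 := by omega
      subst hd0
      simp only [pvEmit2, if_neg hd]
      rw [pvDownTo_nil t (t - 0 + 1) (by omega)]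
      simp

-- canonical block decomposition: from char index k emit values k+1 .. stop+1 downwards
def pvC (cs : List Char) (n k : Int) : List Int :=
  if h : k < n then
    pvDownTo ((pvScanD cs n (n - 1 - k).toNat k 0).1 + 1) (k + 1) ++
      pvC cs n ((pvScanD cs n (n - 1 - k).toNat k 0).1 + 1)
  else []
termination_by (n - k).toNat
decreasing_by have := pvScanD_ge cs n (n - 1 - k).toNat k 0; omega

-- B's final iteration (i = n): push, flush, break
theorem pvLoopB_last (cs : List Char) (n : Int) (f : ℕ) (j a : Int) (res : List Int)
    (ha : a ≤ j) (hj : j = n) :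
    pvLoopB cs n (f + 1) j ((pvDownTo (j - 1) a).reverse) res = res ++ pvDownTo j a := by
  simp only [pvLoopB]
  rw [if_pos (Or.inl (by omega : n ≤ j)), if_pos (by omega : n ≤ j)]
  rw [show ((pvDownTo (j - 1) a).reverse ++ [j]).reverse = pvDownTo j a from by
    rw [pvDownTo_cons j a ha]; simp]

-- a flushing iteration that is not the last: the pending run is emitted, stack resets
theorem pvLoopB_flushstep (cs : List Char) (n : Int) (f : ℕ) (j a : Int) (res : List Int)
    (ha : a ≤ j) (hj : j < n) (hc : pvCharAt cs (j - 1) = 'I') :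
    pvLoopB cs n (f + 1) j ((pvDownTo (j - 1) a).reverse) res
      = pvLoopB cs n f (j + 1) ((pvDownTo (j + 1 - 1) (j + 1)).reverse) (res ++ pvDownTo j a) := by
  simp only [pvLoopB]
  rw [if_pos (Or.inr hc), if_neg (by omega : ¬ n ≤ j)]
  rw [show ((pvDownTo (j - 1) a).reverse ++ [j]).reverse = pvDownTo j a from by
    rw [pvDownTo_cons j a ha]; simp]
  rw [show pvDownTo (j + 1 - 1) (j + 1) = ([] : List Int) from pvDownTo_nil _ _ (by omega)]
  simp

-- a non-flushing iteration: the pending run grows by one element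
theorem pvLoopB_keepstep (cs : List Char) (n : Int) (f : ℕ) (j a : Int) (res : List Int)
    (ha : a ≤ j) (hj : j < n) (hI : pvCharAt cs (j - 1) ≠ 'I') :
    pvLoopB cs n (f + 1) j ((pvDownTo (j - 1) a).reverse) res
      = pvLoopB cs n f (j + 1) ((pvDownTo (j + 1 - 1) a).reverse) res := by
  simp only [pvLoopB]
  rw [if_neg (show ¬ (n ≤ j ∨ pvCharAt cs (j - 1) = 'I') from by
    rintro (h | h)
    · omega
    · exact hI h)]
  rw [if_neg (by omega : ¬ n ≤ j)]
  rw [show j + 1 - 1 = j by ring, pvDownTo_cons j a ha]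
  simp

-- B's loop from a pending decreasing run: emit the current block, then the rest is pvC
theorem pvLoopB_C (cs : List Char) (n : Int) :
    ∀ (N : ℕ) (f : ℕ) (j a : Int) (res : List Int),
      (n - j).toNat ≤ N → n - j ≤ (f : Int) → a ≤ j → j ≤ n →
      pvLoopB cs n (f + 1) j ((pvDownTo (j - 1) a).reverse) res
        = res ++ pvDownTo ((pvScanD cs n (n - 1 - (j - 1)).toNat (j - 1) 0).1 + 1) a
            ++ pvC cs n ((pvScanD cs n (n - 1 - (j - 1)).toNat (j - 1) 0).1 + 1) := by
  intro N
  induction N with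
  | zero =>
    intro f j a res hN hf ha hj
    have hjn : j = n := by omega
    rw [pvLoopB_last cs n f j a res ha hjn]
    rw [pvScanNow cs n (j - 1) (Or.inl (by omega))]
    rw [show j - 1 + 1 = j by ring]
    rw [pvC, dif_neg (by omega : ¬ j < n)]
    simp
  | succ N ih =>
    intro f j a res hN hf ha hj
    by_cases hbreak : j = n
    · rw [pvLoopB_last cs n f j a res ha hbreak]
      rw [pvScanNow cs n (j - 1) (Or.inl (by omega))]
      rw [show j - 1 + 1 = j by ring]
      rw [pvC, dif_neg (by omega : ¬ j < n)]
      simp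
    · have hjlt : j < n := by omega
      cases f with
      | zero => exfalso; push_cast at hf; omega
      | succ f =>
        by_cases hc : pvCharAt cs (j - 1) = 'I'
        · rw [pvLoopB_flushstep cs n (f + 1) j a res ha hjlt hc]
          rw [ih f (j + 1) (j + 1) _ (by omega) (by push_cast at hf ⊢; omega) (le_refl _)
            (by omega)]
          rw [pvScanNow cs n (j - 1) (Or.inr hc)]
          rw [show j - 1 + 1 = j by ring]
          conv_rhs => rw [pvC]
          rw [dif_pos hjlt]
          rw [show j + 1 - 1 = j by ring]
          simp
        · rw [pvLoopB_keepstep cs n (f + 1) j a res ha hjlt hc]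
          rw [ih f (j + 1) a _ (by omega) (by push_cast at hf ⊢; omega) (by omega) (by omega)]
          have hstep := pvScanStep cs n (j - 1) (by omega) hc
          rw [show j - 1 + 1 = j from by ring] at hstep
          rw [hstep]
          simp

theorem pvMainLoop_C (cs : List Char) (n : Int) :
    ∀ (N : ℕ) (f : ℕ) (i : Int) (res : List Int),
      (n - 1 - i).toNat ≤ N → n - 1 - i ≤ (f : Int) →
      (n - 1 ≤ i ∨ pvCharAt cs i = 'I') →
      pvMainLoop cs n f res (i + 2) i 0 = res ++ pvC cs n (i + 1) := by
  intro N
  induction N with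
  | zero =>
    intro f i res hN hf hyp
    have hi : ¬ i < n - 1 := by omega
    rw [pvC, dif_neg (by omega)]
    cases f with
    | zero => simp [pvMainLoop]
    | succ f => simp only [pvMainLoop, if_neg hi]; simp
  | succ N ih =>
    intro f i res hN hf hyp
    by_cases hi : i < n - 1
    · have hI : pvCharAt cs i = 'I' := by
        rcases hyp with h | h
        · omega
        · exact h
      cases f with
      | zero => exfalso; push_cast at hf; omega
      | succ f =>
        have hge := pvScanD_ge cs n (n - 1 - (i + 1)).toNat (i + 1) 0
        have hlen := pvScanD_len cs n (n - 1 - (i + 1)).toNat (i + 1) 0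
        have hstop := pvScanD_stop cs n (n - 1 - (i + 1)).toNat (i + 1) 0 (by push_cast; omega)
        set m := (pvScanD cs n (n - 1 - (i + 1)).toNat (i + 1) 0).1 with hm
        set d := (pvScanD cs n (n - 1 - (i + 1)).toNat (i + 1) 0).2 with hd
        clear_value m d
        have hmd : m = i + 1 + d := by omega
        have hd0 : 0 ≤ d := by omega
        by_cases hc : pvCharAt cs i = 'I' ∧ (i ≥ n - 2 ∨ pvCharAt cs (i + 1) = 'I')
        · have hscan := pvScanNow cs n (i + 1)
            (by cases hc.2 with
                | inl h3 => exact Or.inl (by omega)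
                | inr h3 => exact Or.inr h3)
          have hm1 : m = i + 1 := by rw [hm, hscan]
          simp only [pvMainLoop, if_pos hi, if_pos hc]
          rw [show i + 2 + 1 = i + 1 + 2 by ring]
          rw [ih f (i + 1) (res ++ [i + 2]) (by omega) (by push_cast at hf ⊢; omega)
            (by rcases hc.2 with h3 | h3
                · exact Or.inl (by omega)
                · exact Or.inr h3)]
          conv_rhs => rw [pvC]
          rw [dif_pos (show i + 1 < n by omega), hscan]
          rw [show i + 1 + 1 = i + 2 by ring]
          rw [pvDownTo_cons (i + 2) (i + 2) (le_refl _),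
            pvDownTo_nil (i + 2 - 1) (i + 2) (by omega)]
          simp
        · simp only [pvMainLoop, if_pos hi, if_neg hc]
          simp only [← hm, ← hd]
          rw [pvEmit2_eq d.toNat (res ++ [i + 2 + d]) (i + 2 + 1) (i + 2 + d - 1) d hd0
            (by push_cast; omega)]
          simp only []
          rw [show i + 2 + 1 + d = m + 2 by omega]
          rw [ih f m _ (by omega) (by push_cast at hf ⊢; omega) hstop]
          conv_rhs => rw [pvC]
          rw [dif_pos (show i + 1 < n by omega), ← hm]
          rw [show i + 1 + 1 = i + 2 by ring]
          rw [pvDownTo_cons (m + 1) (i + 2) (by omega)]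
          rw [show i + 2 + d - 1 - d + 1 = i + 2 by ring]
          rw [show i + 2 + d - 1 = m by omega]
          rw [show i + 2 + d = m + 1 by omega]
          rw [show m + 1 - 1 = m by ring]
          simp
    · rw [pvC, dif_neg (by omega)]
      cases f with
      | zero => simp [pvMainLoop]
      | succ f => simp only [pvMainLoop, if_neg hi]; simp

theorem A_eq_C (s : String) (n : Int) (hn : 1 ≤ n) :
    find_permutation2 s n = pvC s.toList n 0 := by
  simp only [find_permutation2]
  set cs := s.toList with hcs
  by_cases hI : pvCharAt cs 0 = 'I'
  · rw [if_pos hI]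
    rw [show (2 : Int) = 0 + 2 by ring]
    rw [pvMainLoop_C cs n (n - 1).toNat (n - 1).toNat 0 [1] (by omega) (by push_cast; omega)
      (Or.inr hI)]
    conv_rhs => rw [pvC]
    rw [dif_pos (show (0 : Int) < n by omega)]
    have hscan := pvScanNow cs n 0 (Or.inr hI)
    rw [show n - 1 - (0 : Int) = n - 1 by ring] at hscan ⊢
    rw [hscan]
    norm_num [pvDownTo_cons 1 1 (le_refl (1 : Int)), pvDownTo_nil 0 1 (by omega : (0 : Int) < 1)]
  · rw [if_neg hI]
    have hcan : (n - 1 : Int) = n - 1 - 0 := by ring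
    have hge := pvScanD_ge cs n (n - 1).toNat 0 0
    have hlen := pvScanD_len cs n (n - 1).toNat 0 0
    have hstop := pvScanD_stop cs n (n - 1).toNat 0 0 (by push_cast; omega)
    set m := (pvScanD cs n (n - 1).toNat 0 0).1 with hm
    set d := (pvScanD cs n (n - 1).toNat 0 0).2 with hd
    clear_value m d
    have hmd : d = m := by omega
    have hd0 : 0 ≤ d := by omega
    rw [pvEmit1_eq d.toNat [1 + (d + 1) - 1] (1 + (d + 1) - 1 - 1) d hd0 (by push_cast; omega)]
    simp only []
    have e2 : 1 + (d + 1) - 1 - 1 = d := by ring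
    have e1 : 1 + (d + 1) - 1 = d + 1 := by ring
    rw [e2, e1]
    have hres : [d + 1] ++ pvDownTo d (d - d + 1) = pvDownTo (d + 1) 1 := by
      rw [show d - d + 1 = (1 : Int) by ring]
      rw [pvDownTo_cons (d + 1) 1 (by omega)]
      simp [show d + 1 - 1 = d by ring]
    rw [hres]
    rw [show 1 + (d + 1) = m + 2 by omega]
    rw [pvMainLoop_C cs n (n - 1 - m).toNat (n - 1 - m).toNat m (pvDownTo (d + 1) 1)
      (by omega) (by push_cast; omega) hstop]
    conv_rhs => rw [pvC]
    rw [dif_pos (show (0 : Int) < n by omega), ← hcan, ← hm]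
    rw [show (0 : Int) + 1 = 1 by ring, show d + 1 = m + 1 by omega]

theorem B_eq_C (s : String) (n : Int) (hn : 1 ≤ n) :
    find_permutation2_alt s n = pvC s.toList n 0 := by
  unfold find_permutation2_alt
  have h := pvLoopB_C s.toList n (n - 1).toNat (n - 1).toNat 1 1 [] (by omega)
    (by push_cast; omega) (le_refl _) hn
  rw [pvDownTo_nil (1 - 1) 1 (by omega)] at h
  simp only [List.reverse_nil] at h
  rw [h]
  rw [show (1 : Int) - 1 = 0 by ring]
  conv_rhs => rw [pvC]
  rw [dif_pos (show (0 : Int) < n by omega)]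
  rw [show (0 : Int) + 1 = 1 by ring]
  simp

theorem A_neg (s : String) (n : Int) (hn : n ≤ 0) : find_permutation2 s n = [1] := by
  have hml : ∀ (f : ℕ) (res : List Int) (c : Int), pvMainLoop s.toList n f res c 0 0 = res := by
    intro f res c
    cases f with
    | zero => rfl
    | succ f => simp only [pvMainLoop]; rw [if_neg (by omega : ¬ (0 : Int) < n - 1)]
  simp only [find_permutation2]
  rw [show (n - 1).toNat = 0 by omega]
  by_cases hI : pvCharAt s.toList 0 = 'I'
  · rw [if_pos hI, hml]
  · rw [if_neg hI]
    simp only [pvScanD]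
    simp [pvEmit1, hml]

theorem B_neg (s : String) (n : Int) (hn : n ≤ 0) : find_permutation2_alt s n = [1] := by
  unfold find_permutation2_alt
  rw [show (n - 1).toNat = 0 by omega]
  simp only [pvLoopB]
  rw [if_pos (Or.inl (by omega : n ≤ 1)), if_pos (by omega : n ≤ (1 : Int))]
  simp

-- ===== VERDICT (by name: the statement is the Claim_ definition above) =====
theorem find_permutation2_spec : Claim_equal_find_permutation2 := by
  intro s n hdom hpre
  unfold Spec_find_permutation2
  by_cases hn : 1 ≤ n
  · rw [A_eq_C s n hn, B_eq_C s n hn]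
  · rw [A_neg s n (by omega), B_neg s n (by omega)]
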